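-- pv_equiv track=rewrite | github.com/Ephemerua/upgraded-potato | source/report/log_view.py | free_heap_info
-- ===== SOURCE A (Python) =====
-- def free_heap_info(node_info, free_info):
--     '''
--     delete the released heap
--     :param node_info: a list of heap info
--     :param free_info: a node which will be free
--     :return: the node which will be free in heap info
--     '''
--     success = False
--     index = 0
--     for info in node_info:
--         if info[0] == free_info[0]:
--             success = True
--             break
--         index += 1
--     if success:
--         del node_info[index]
--         return node_info
--     else:
--         return node_info
-- ===== SOURCE B (Python) =====
-- def free_heap_info(node_info, free_info):
--     key = free_info[0]
--     removed = False
--     result = []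
--     for info in node_info:
--         if not removed and info[0] == key:
--             removed = True
--         else:
--             result.append(info)
--     node_info[:] = result
--     return node_info
-- ===== Notes on version B (the rewrite author's own statement) =====
-- stated objective: simpler
-- what changed: Replaces A's find-index-then-delete loop (boolean flag plus running index, then del) with a single filtering pass that rebuilds the list dropping only the first element whose head equals free_info[0], written back via slice assignment.
-- outside the precondition, e.g. on free_heap_info([], []): A returns [], B raises IndexError
import Mathlib
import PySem

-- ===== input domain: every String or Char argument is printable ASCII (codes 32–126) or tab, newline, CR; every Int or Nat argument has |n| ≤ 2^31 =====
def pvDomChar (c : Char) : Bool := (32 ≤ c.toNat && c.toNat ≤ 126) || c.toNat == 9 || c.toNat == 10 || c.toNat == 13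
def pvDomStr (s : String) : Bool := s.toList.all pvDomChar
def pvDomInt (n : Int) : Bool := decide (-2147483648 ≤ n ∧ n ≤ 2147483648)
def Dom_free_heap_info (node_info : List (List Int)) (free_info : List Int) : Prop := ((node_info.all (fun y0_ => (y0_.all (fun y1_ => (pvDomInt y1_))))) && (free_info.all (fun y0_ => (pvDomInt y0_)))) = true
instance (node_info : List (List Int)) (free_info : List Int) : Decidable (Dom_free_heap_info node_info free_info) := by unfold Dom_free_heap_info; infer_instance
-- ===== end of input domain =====

-- B rebuilds the list in one filtering pass (flag + slice assignment) instead of A's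
-- find-index-then-del; same mutation of node_info in place, equivalence is about the return value.


-- ===== PORT A =====
-- A's for-loop: scan for the first element whose [0] equals free_info[0], counting the index.
-- info[0] / free_info[0] are PySem.List.pyGet? (none = IndexError, excluded by Pre_).
def pvFindLoop (fi : List Int) : List (List Int) → Nat → Bool × Nat
  | [], idx => (false, idx)
  | info :: rest, idx =>
    if PySem.List.pyGet? info 0 == PySem.List.pyGet? fi 0 then (true, idx)
    else pvFindLoop fi rest (idx + 1)

def free_heap_info (node_info : List (List Int)) (free_info : List Int) : List (List Int) :=
  let r := pvFindLoop free_info node_info 0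
  if r.1 then node_info.eraseIdx r.2 else node_info   -- del node_info[index]

-- ===== PORT B =====
def free_heap_info_alt (node_info : List (List Int)) (free_info : List Int) : List (List Int) :=
  let key := PySem.List.pyGet? free_info 0   -- key = free_info[0] (none = IndexError, excluded by Pre_)
  let st := node_info.foldl
    (fun (st : Bool × List (List Int)) info =>
      if !st.1 && (PySem.List.pyGet? info 0 == key) then (true, st.2)
      else (st.1, st.2 ++ [info]))
    (false, ([] : List (List Int)))
  st.2

-- ===== PRECONDITION & SPEC =====
-- Pre_ excludes exactly the inputs on which Python raises IndexError: an empty free_info, or an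
-- empty inner list scanned before a match (elements after the first match are never indexed by
-- either program); the single excluded input where A still returns is ([], []) — there A returns
-- [] without touching free_info while B evaluates free_info[0] first and raises.
def Pre_free_heap_info (node_info : List (List Int)) (free_info : List Int) : Prop :=
  free_info ≠ [] ∧
  ∀ l ∈ node_info.takeWhile (fun l => !(l.head? == free_info.head?)), l ≠ []
instance (node_info : List (List Int)) (free_info : List Int) : Decidable (Pre_free_heap_info node_info free_info) := by unfold Pre_free_heap_info; infer_instance

def pvWitness_free_heap_info : List (List Int) × List Int := ([[1, 2], [3, 4]], [3])

def Spec_free_heap_info (node_info : List (List Int)) (free_info : List Int) (out : List (List Int)) : Prop := out = free_heap_info_alt node_info free_info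
instance (node_info : List (List Int)) (free_info : List Int) (out : List (List Int)) : Decidable (Spec_free_heap_info node_info free_info out) := by unfold Spec_free_heap_info; infer_instance

-- ===== CLAIM (what is proved, stated in full; the proofs are below) =====
def Claim_equal_free_heap_info : Prop := ∀ (node_info : List (List Int)) (free_info : List Int), Dom_free_heap_info node_info free_info → Pre_free_heap_info node_info free_info → Spec_free_heap_info node_info free_info (free_heap_info node_info free_info)

-- ===== LEMMAS AND PROOFS =====
-- Common characterisation: drop the first element whose [0] equals the key.
def pvRmFirst (key : Option Int) : List (List Int) → List (List Int)
  | [] => []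
  | x :: xs => if PySem.List.pyGet? x 0 == key then xs else x :: pvRmFirst key xs

theorem pvFindLoop_shift (fi : List Int) (l : List (List Int)) (n : Nat) :
    pvFindLoop fi l (n + 1) = ((pvFindLoop fi l n).1, (pvFindLoop fi l n).2 + 1) := by
  induction l generalizing n with
  | nil => simp [pvFindLoop]
  | cons x xs ih =>
    simp only [pvFindLoop]
    split_ifs <;> simp [ih]

theorem portA_rmFirst (fi : List Int) (l : List (List Int)) :
    (if (pvFindLoop fi l 0).1 then l.eraseIdx (pvFindLoop fi l 0).2 else l)
      = pvRmFirst (PySem.List.pyGet? fi 0) l := by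
  induction l with
  | nil => simp [pvFindLoop, pvRmFirst]
  | cons x xs ih =>
    by_cases h : (PySem.List.pyGet? x 0 == PySem.List.pyGet? fi 0) = true
    · have hl : pvFindLoop fi (x :: xs) 0 = (true, 0) := by simp [pvFindLoop, h]
      simp [hl, pvRmFirst, h]
    · have hl : pvFindLoop fi (x :: xs) 0
          = ((pvFindLoop fi xs 0).1, (pvFindLoop fi xs 0).2 + 1) := by
        rw [pvFindLoop, if_neg h, pvFindLoop_shift]
      rw [hl, pvRmFirst, if_neg h]
      by_cases hs : (pvFindLoop fi xs 0).1
      · rw [if_pos hs, ← ih, if_pos hs]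
        simp [List.eraseIdx]
      · rw [if_neg hs, ← ih, if_neg hs]

theorem portB_true (key : Option Int) (l : List (List Int)) (acc : List (List Int)) :
    (l.foldl
      (fun (st : Bool × List (List Int)) info =>
        if !st.1 && (PySem.List.pyGet? info 0 == key) then (true, st.2)
        else (st.1, st.2 ++ [info]))
      (true, acc)).2 = acc ++ l := by
  induction l generalizing acc with
  | nil => simp
  | cons x xs ih =>
    rw [List.foldl_cons]
    simp only [Bool.not_true, Bool.false_and]
    rw [if_neg (by simp), ih]
    simp

theorem portB_rmFirst (key : Option Int) (l : List (List Int)) (acc : List (List Int)) :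
    (l.foldl
      (fun (st : Bool × List (List Int)) info =>
        if !st.1 && (PySem.List.pyGet? info 0 == key) then (true, st.2)
        else (st.1, st.2 ++ [info]))
      (false, acc)).2 = acc ++ pvRmFirst key l := by
  induction l generalizing acc with
  | nil => simp [pvRmFirst]
  | cons x xs ih =>
    rw [List.foldl_cons]
    simp only [Bool.not_false, Bool.true_and]
    by_cases h : (PySem.List.pyGet? x 0 == key) = true
    · rw [if_pos h, portB_true]
      simp [pvRmFirst, h]
    · rw [if_neg h, ih]
      simp [pvRmFirst, h]

-- ===== VERDICT (by name: the statement is the Claim_ definition above) =====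
theorem free_heap_info_spec : Claim_equal_free_heap_info := by
  intro node_info free_info _ _
  unfold Spec_free_heap_info free_heap_info free_heap_info_alt
  rw [portB_rmFirst]
  simpa using portA_rmFirst free_info node_info
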